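-- pv_equiv track=rewrite | github.com/mohit2502/CPSC597 | pythonProject/main.py | add_node_ext
-- ===== SOURCE A (Python) =====
-- def strip_split(x):
--     x = x.replace(',', '')
--     x = x.replace('<', '')
--     x = x.replace('>', '')
--     x = x.split()
--     return x
--
-- def add_node_ext(t, x_id, gn):
--     graph_node = gn.copy()
--     if None != x_id:
--         x_id = strip_split(x_id)
--         for x in x_id:
--             if ("From" == t):
--                 graph_node.insert(0, x)
--             else:
--                 graph_node.append(x)
--     return graph_node
-- ===== SOURCE B (Python) =====
-- def add_node_ext(t, x_id, gn):
--     if x_id is None: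
--         return list(gn)
--     # single character-level scan: skip ',<>' and cut tokens at whitespace
--     tokens = []
--     cur = []
--     for c in x_id + ' ':
--         if c in ',<>':
--             continue
--         if c.isspace():
--             if cur:
--                 tokens.append(''.join(cur))
--                 cur = []
--         else:
--             cur.append(c)
--     if t == "From":
--         return tokens[::-1] + gn
--     return gn + tokens
-- ===== Notes on version B (the rewrite author's own statement) =====
-- stated objective: alternative
-- what changed: Replaced A's three whole-string replace passes, split() and per-token insert(0)/append mutation loop with a single character-level scan that skips ',<>' and cuts tokens at whitespace, then builds the result as one list concatenation (reversed tokens prepended for 'From').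
import Mathlib
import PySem

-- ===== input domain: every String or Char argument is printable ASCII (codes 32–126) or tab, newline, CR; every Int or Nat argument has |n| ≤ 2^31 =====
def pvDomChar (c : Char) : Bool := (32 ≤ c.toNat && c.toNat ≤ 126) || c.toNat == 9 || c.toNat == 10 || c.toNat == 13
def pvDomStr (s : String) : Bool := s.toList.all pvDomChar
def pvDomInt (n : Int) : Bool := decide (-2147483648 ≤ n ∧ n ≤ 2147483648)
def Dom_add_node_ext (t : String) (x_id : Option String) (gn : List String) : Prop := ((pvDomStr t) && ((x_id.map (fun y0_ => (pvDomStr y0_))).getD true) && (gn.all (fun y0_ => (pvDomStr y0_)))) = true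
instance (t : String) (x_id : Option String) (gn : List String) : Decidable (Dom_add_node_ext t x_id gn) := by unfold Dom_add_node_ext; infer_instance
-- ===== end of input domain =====

-- B replaces A's three whole-string replace passes + split + per-token insert/append mutation loop
-- with one character-level scan that tokenizes directly, followed by a single concatenation (objective: simpler).

-- ===== PORT A =====
def strip_split (x : String) : List String :=
  let x := PySem.Str.replace x "," ""
  let x := PySem.Str.replace x "<" ""
  let x := PySem.Str.replace x ">" ""
  PySem.Str.split₀ x

def add_node_ext (t : String) (x_id : Option String) (gn : List String) : List String :=
  let graph_node := gn
  match x_id with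
  | none => graph_node
  | some s =>
    let xs := strip_split s
    xs.foldl (fun acc x => if "From" == t then x :: acc else acc ++ [x]) graph_node

-- ===== PORT B =====
-- one step of B's scan: skip ',' '<' '>', flush the current token at whitespace, else extend it
-- (PySem.Chars.isspace c is Python's c.isspace(); exact on the ASCII domain)
def bStep (st : List String × List Char) (c : Char) : List String × List Char :=
  if c = ',' ∨ c = '<' ∨ c = '>' then st
  else if PySem.Chars.isspace c then
    (if st.2 = [] then st else (st.1 ++ [String.ofList st.2], []))
  else (st.1, st.2 ++ [c])

def add_node_ext_alt (t : String) (x_id : Option String) (gn : List String) : List String :=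
  match x_id with
  | none => gn
  | some s =>
    -- trailing sentinel ' ' flushes the last token, as in Source B's `for c in x_id + ' '`
    let tokens := ((s.toList ++ [' ']).foldl bStep ([], [])).1
    if t == "From" then tokens.reverse ++ gn else gn ++ tokens

-- ===== PRECONDITION & SPEC =====
def Spec_add_node_ext (t : String) (x_id : Option String) (gn : List String) (out : List String) : Prop := out = add_node_ext_alt t x_id gn
instance (t : String) (x_id : Option String) (gn : List String) (out : List String) : Decidable (Spec_add_node_ext t x_id gn out) := by unfold Spec_add_node_ext; infer_instance

-- ===== CLAIM =====
def Claim_equal_add_node_ext : Prop := ∀ (t : String) (x_id : Option String) (gn : List String), Dom_add_node_ext t x_id gn → Spec_add_node_ext t x_id gn (add_node_ext t x_id gn)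

-- ===== LEMMAS AND PROOFS =====

-- the characters B's scan keeps (Python: not in ',<>')
def pvKeep (c : Char) : Bool := !(c == ',' || c == '<' || c == '>')

-- the flush/extend part of bStep (bStep with the skip branch removed)
def pvStep2 (st : List String × List Char) (c : Char) : List String × List Char :=
  if PySem.Chars.isspace c then
    (if st.2 = [] then st else (st.1 ++ [String.ofList st.2], []))
  else (st.1, st.2 ++ [c])

lemma bStep_eq (st : List String × List Char) (c : Char) :
    bStep st c = if pvKeep c then pvStep2 st c else st := by
  by_cases h : c = ',' ∨ c = '<' ∨ c = '>'
  · have hk : pvKeep c = false := by rcases h with h | h | h <;> simp [pvKeep, h]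
    simp [bStep, h, hk]
  · have hk : pvKeep c = true := by simp [pvKeep]; tauto
    simp [bStep, pvStep2, h, hk]

-- A's single-character replace with "" is a filter
lemma replace_go_filter (d : Char) :
    ∀ (fuel : Nat) (l acc : List Char), l.length ≤ fuel →
      PySem.Chars.replace.go [d] [] fuel l acc = acc.reverse ++ l.filter (fun c => !(c == d)) := by
  intro fuel
  induction fuel with
  | zero =>
    intro l acc h
    cases l with
    | nil => simp [PySem.Chars.replace.go]
    | cons c t => simp at h
  | succ n ih =>
    intro l acc h
    cases l with
    | nil => simp [PySem.Chars.replace.go]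
    | cons c t =>
      by_cases hd : c = d
      · subst hd
        have hp : [c].isPrefixOf (c :: t) = true := by simp [List.isPrefixOf]
        simp only [PySem.Chars.replace.go, hp, if_pos, List.length_cons, List.length_nil,
          List.drop_succ_cons, List.drop_zero, List.reverse_nil, List.nil_append]
        rw [ih t acc (by simpa using Nat.le_of_succ_le_succ h)]
        simp
      · have hp : [d].isPrefixOf (c :: t) = false := by
          simp [List.isPrefixOf]; exact fun e => hd e.symm
        simp only [PySem.Chars.replace.go, hp]
        rw [ih t _ (by simpa using Nat.le_of_succ_le_succ h)]
        simp [hd]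

lemma replace_single (d : Char) (cs : List Char) :
    PySem.Chars.replace cs [d] [] = cs.filter (fun c => !(c == d)) := by
  unfold PySem.Chars.replace
  simp [replace_go_filter d cs.length cs [] (le_refl _)]

-- split₀.go's accumulator factors out
lemma split₀_go_acc :
    ∀ (cs cur : List Char) (acc : List (List Char)),
      PySem.Chars.split₀.go cs cur acc = acc.reverse ++ PySem.Chars.split₀.go cs cur [] := by
  intro cs
  induction cs with
  | nil =>
    intro cur acc
    by_cases h : cur.isEmpty <;> simp [PySem.Chars.split₀.go, h]
  | cons c rest ih =>
    intro cur acc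
    by_cases hs : PySem.Chars.isspace c
    · by_cases hc : cur.isEmpty
      · simp only [PySem.Chars.split₀.go, hs, hc, if_pos]
        exact ih [] acc
      · simp only [PySem.Chars.split₀.go, hs, if_pos, hc, if_neg, Bool.false_eq_true,
          not_false_iff]
        rw [ih [] (cur.reverse :: acc), ih [] [cur.reverse]]
        simp
    · simp only [PySem.Chars.split₀.go, hs, Bool.false_eq_true, if_neg, not_false_iff]
      exact ih (c :: cur) acc

-- B's flush/extend fold computes split₀ (token list forward, current token forward)
lemma fold_step2_go :
    ∀ (cs cur : List Char) (ts : List String),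
      ((cs ++ [' ']).foldl pvStep2 (ts, cur)).1
        = ts ++ (PySem.Chars.split₀.go cs cur.reverse []).map String.ofList := by
  intro cs
  induction cs with
  | nil =>
    intro cur ts
    have hs : PySem.Chars.isspace ' ' = true := by decide
    by_cases hc : cur = []
    · subst hc; simp [pvStep2, hs, PySem.Chars.split₀.go]
    · have : cur.reverse.isEmpty = false := by
        simp [hc]
      simp [pvStep2, hs, hc, PySem.Chars.split₀.go, this]
  | cons c rest ih =>
    intro cur ts
    by_cases hs : PySem.Chars.isspace c
    · by_cases hc : cur = []
      · subst hc
        have h2 : pvStep2 (ts, ([] : List Char)) c = (ts, []) := by simp [pvStep2, hs]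
        simp only [List.cons_append, List.foldl_cons, h2]
        rw [ih [] ts]
        simp [PySem.Chars.split₀.go, hs]
      · have h2 : pvStep2 (ts, cur) c = (ts ++ [String.ofList cur], []) := by
          simp [pvStep2, hs, hc]
        have hre : cur.reverse.isEmpty = false := by simp [hc]
        simp only [List.cons_append, List.foldl_cons, h2]
        rw [ih [] (ts ++ [String.ofList cur])]
        simp only [PySem.Chars.split₀.go, hs, if_pos, hre, Bool.false_eq_true, if_neg,
          not_false_iff]
        rw [split₀_go_acc rest [] [cur.reverse.reverse]]
        simp
    · have h2 : pvStep2 (ts, cur) c = (ts, cur ++ [c]) := by simp [pvStep2, hs]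
      simp only [List.cons_append, List.foldl_cons, h2]
      rw [ih (cur ++ [c]) ts]
      simp [PySem.Chars.split₀.go, hs]

-- the three filters of A's replaces compose to B's keep-predicate
lemma filter3_keep (cs : List Char) :
    ((cs.filter (fun c => !(c == ','))).filter (fun c => !(c == '<'))).filter (fun c => !(c == '>'))
      = cs.filter pvKeep := by
  simp only [List.filter_filter]
  apply List.filter_congr
  intro c _
  unfold pvKeep
  cases h1 : c == ',' <;> cases h2 : c == '<' <;> cases h3 : c == '>' <;> simp_all

-- B's tokens equal A's strip_split
lemma tokens_eq_strip_split (s : String) :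
    ((s.toList ++ [' ']).foldl bStep ([], [])).1 = strip_split s := by
  have hb : bStep = (fun x y => if pvKeep y then pvStep2 x y else x) := by
    funext st c; exact bStep_eq st c
  calc ((s.toList ++ [' ']).foldl bStep ([], [])).1
      = ((s.toList ++ [' ']).foldl (fun x y => if pvKeep y then pvStep2 x y else x) ([], [])).1 := by
        rw [hb]
    _ = (((s.toList ++ [' ']).filter pvKeep).foldl pvStep2 ([], [])).1 := by
        rw [List.foldl_filter]
    _ = ((s.toList.filter pvKeep ++ [' ']).foldl pvStep2 ([], [])).1 := by
        have : pvKeep ' ' = true := by decide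
        simp [List.filter_append, this]
    _ = (PySem.Chars.split₀.go (s.toList.filter pvKeep) [] []).map String.ofList := by
        rw [fold_step2_go (s.toList.filter pvKeep) [] []]
        simp
    _ = strip_split s := by
        unfold strip_split PySem.Str.split₀ PySem.Str.replace PySem.Chars.split₀
        simp only [String.toList_ofList, String.toList_empty]
        rw [show ((",":String)).toList = [','] from rfl, show (("<":String)).toList = ['<'] from rfl,
            show ((">":String)).toList = ['>'] from rfl]
        rw [replace_single, replace_single, replace_single, filter3_keep]

-- A's prepend/append loop as one concatenation
lemma foldl_ins (b : Bool) (xs gn : List String) :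
    xs.foldl (fun acc x => if b then x :: acc else acc ++ [x]) gn
      = if b then xs.reverse ++ gn else gn ++ xs := by
  induction xs generalizing gn with
  | nil => cases b <;> simp
  | cons a l ih => cases b <;> simp_all

-- ===== VERDICT =====
theorem add_node_ext_spec : Claim_equal_add_node_ext := by
  intro t x_id gn _
  unfold Spec_add_node_ext add_node_ext add_node_ext_alt
  cases x_id with
  | none => rfl
  | some s =>
    dsimp only
    rw [foldl_ins ("From" == t) (strip_split s) gn, tokens_eq_strip_split s]
    by_cases h : t = "From"
    · subst h; simp
    · have h1 : ("From" == t) = false := by simpa using fun e => h e.symm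
      have h2 : (t == "From") = false := by simpa using h
      rw [h1, h2]
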